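-- pv_equiv track=rewrite | github.com/bennv14/python_ptit | TongHop.py | demCapDongXu
-- ===== SOURCE A (Python) =====
-- def demCapDongXu(matrix):
--     count=0
--     n=len(matrix)
--     for i in range(n):
--         for j in range(n):
--             if matrix[i][j]=='C':
--                 for k in range(i+1,n):
--                     if matrix[k][j]=='C':
--                         count+=1
--
--                 for k in range(j+1,n):
--                     if matrix[i][k]=='C':
--                         count+=1
--
--     return count
-- ===== SOURCE B (Python) =====
-- def demCapDongXu(matrix):
--     n = len(matrix)
--     total = 0
--     for i in range(n):
--         c = matrix[i][:n].count('C')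
--         total += c * (c - 1) // 2
--     for j in range(n):
--         c = [matrix[i][j] for i in range(n)].count('C')
--         total += c * (c - 1) // 2
--     return total
-- ===== Notes on version B (the rewrite author's own statement) =====
-- stated objective: alternative
-- what changed: Replaces the triple nested scan (for every 'C' cell, rescan the rest of its row and column) with per-row and per-column 'C' counts combined by the closed form c*(c-1)//2.
import Mathlib
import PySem

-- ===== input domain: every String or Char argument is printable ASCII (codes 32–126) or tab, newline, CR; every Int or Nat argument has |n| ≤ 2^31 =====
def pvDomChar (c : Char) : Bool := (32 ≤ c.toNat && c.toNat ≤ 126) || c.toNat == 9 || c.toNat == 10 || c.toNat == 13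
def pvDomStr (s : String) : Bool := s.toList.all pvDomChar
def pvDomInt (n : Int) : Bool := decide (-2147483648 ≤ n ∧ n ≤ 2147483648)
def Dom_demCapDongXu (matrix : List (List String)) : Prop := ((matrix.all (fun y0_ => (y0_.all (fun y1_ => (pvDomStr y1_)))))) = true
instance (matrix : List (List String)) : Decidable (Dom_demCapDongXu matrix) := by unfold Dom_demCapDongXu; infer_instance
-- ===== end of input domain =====

-- B replaces A's triple nested scan by per-row/per-column 'C' counts combined with the closed form c*(c-1)//2 (alternative algorithm).


-- ===== PORT A =====
-- Literal transliteration: for i in range(n): for j in range(n): if matrix[i][j]=='C':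
-- two inner scans over range(i+1,n) (= (List.range n).drop (i+1)) and range(j+1,n); indexing via getD (in range under Pre_).
def demCapDongXu (matrix : List (List String)) : Int :=
  let n := matrix.length
  (List.range n).foldl (fun count i =>
    (List.range n).foldl (fun count j =>
      if (matrix.getD i []).getD j "" == "C" then
        let count := ((List.range n).drop (i+1)).foldl
          (fun c k => if (matrix.getD k []).getD j "" == "C" then c + 1 else c) count
        ((List.range n).drop (j+1)).foldl
          (fun c k => if (matrix.getD i []).getD k "" == "C" then c + 1 else c) count
      else count) count) 0

-- ===== PORT B =====
-- Literal transliteration of Source B: row pass (matrix[i][:n].count('C')), then column pass, each adding c*(c-1)//2.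
def demCapDongXu_alt (matrix : List (List String)) : Int :=
  let n := matrix.length
  let t1 := (List.range n).foldl (fun t i =>
    t + PySem.Int.floordiv ((((matrix.getD i []).take n).countP (· == "C") : Int) *
          ((((matrix.getD i []).take n).countP (· == "C") : Int) - 1)) 2) 0
  (List.range n).foldl (fun t j =>
    t + PySem.Int.floordiv ((((List.range n).map (fun i => (matrix.getD i []).getD j "")).countP (· == "C") : Int) *
          ((((List.range n).map (fun i => (matrix.getD i []).getD j "")).countP (· == "C") : Int) - 1)) 2) t1

-- ===== PRECONDITION & SPEC =====
-- A raises IndexError when some row is shorter than the number of rows (matrix[i][j] for j < len(matrix)); Pre_ excludes exactly those.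
def Pre_demCapDongXu (matrix : List (List String)) : Prop :=
  ∀ row ∈ matrix, matrix.length ≤ row.length
instance (matrix : List (List String)) : Decidable (Pre_demCapDongXu matrix) := by
  unfold Pre_demCapDongXu; infer_instance
def pvWitness_demCapDongXu : List (List String) := [["C", "C"], ["C", "X"]]

def Spec_demCapDongXu (matrix : List (List String)) (out : Int) : Prop := out = demCapDongXu_alt matrix
instance (matrix : List (List String)) (out : Int) : Decidable (Spec_demCapDongXu matrix out) := by unfold Spec_demCapDongXu; infer_instance

-- ===== CLAIM (what is proved, stated in full; the proofs are below) =====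
def Claim_equal_demCapDongXu : Prop := ∀ (matrix : List (List String)), Dom_demCapDongXu matrix → Pre_demCapDongXu matrix → Spec_demCapDongXu matrix (demCapDongXu matrix)

-- ===== LEMMAS AND PROOFS =====

-- 0/1 indicator of a Bool predicate on Nat, and its sum along a list of indices
def pvX (g : Nat → Bool) (k : Nat) : Int := if g k then 1 else 0
def pvSL (g : Nat → Bool) (l : List Nat) : Int := (l.map (pvX g)).sum
-- A's "for each hit j, count later hits" sum along range n
def pvT (g : Nat → Bool) (n : Nat) : Int :=
  ((List.range n).map (fun j => if g j then pvSL g ((List.range n).drop (j+1)) else 0)).sum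

lemma pvSL_countP (g : Nat → Bool) (l : List Nat) : pvSL g l = (l.countP g : Int) := by
  simp only [pvSL]
  exact PySem.List.sum_map_ite_one_zero g l

lemma foldl_shift {α : Type} (f : Int → α → Int) (δ : α → Int)
    (h : ∀ c x, f c x = c + δ x) : ∀ (l : List α) (c : Int), l.foldl f c = c + (l.map δ).sum := by
  intro l
  induction l with
  | nil => simp
  | cons x xs ih => intro c; simp [List.foldl_cons, h, ih, add_assoc]

lemma list_sum_range_eq_finset (f : Nat → Int) (n : Nat) :
    ((List.range n).map f).sum = ∑ i ∈ Finset.range n, f i := by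
  induction n with
  | zero => simp
  | succ n ih => simp [List.range_succ, Finset.sum_range_succ, ih]

lemma sum_comm_range (F : Nat → Nat → Int) (a b : Nat) :
    ((List.range a).map (fun i => ((List.range b).map (fun j => F i j)).sum)).sum
      = ((List.range b).map (fun j => ((List.range a).map (fun i => F i j)).sum)).sum := by
  simp only [list_sum_range_eq_finset]
  exact Finset.sum_comm

-- core: twice A's "later hits" sum is c*(c-1) for c the total count
lemma two_mul_pvT (g : Nat → Bool) (n : Nat) :
    2 * pvT g n = pvSL g (List.range n) * (pvSL g (List.range n) - 1) := by
  induction n with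
  | zero => simp [pvT, pvSL]
  | succ n ih =>
    have hdrop : ∀ j, j < n →
        (List.range (n+1)).drop (j+1) = (List.range n).drop (j+1) ++ [n] := by
      intro j hj
      rw [List.range_succ, List.drop_append_of_le_length (by simpa using hj)]
    have hstep : pvT g (n+1) = pvT g n + pvSL g (List.range n) * pvX g n := by
      unfold pvT
      rw [List.range_succ, List.map_append, List.sum_append]
      have h1 : (List.range n).map
            (fun j => if g j then pvSL g ((List.range n ++ [n]).drop (j+1)) else 0)
          = (List.range n).map
            (fun j => (if g j then pvSL g ((List.range n).drop (j+1)) else 0)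
                      + pvX g j * pvX g n) := by
        apply List.map_congr_left
        intro j hj
        have hj' : j < n := List.mem_range.mp hj
        rw [List.drop_append_of_le_length (by simpa using hj')]
        by_cases hg : g j <;> simp [hg, pvSL, pvX, mul_comm]
      rw [h1, PySem.List.sum_map_add_int]
      have h2 : ((List.range n).map (fun j => pvX g j * pvX g n)).sum
          = pvSL g (List.range n) * pvX g n := by
        simp only [pvSL]
        rw [← List.sum_map_mul_right]
      simp [pvSL, h2]
    have hS : pvSL g (List.range (n+1)) = pvSL g (List.range n) + pvX g n := by
      simp [pvSL, List.range_succ]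
    rw [hstep, hS]
    have hx : pvX g n * pvX g n = pvX g n := by
      by_cases hg : g n <;> simp [pvX, hg]
    nlinarith [ih, hx]

lemma fdiv_half (L M : Int) (h : M = 2 * L) : PySem.Int.floordiv M 2 = L := by
  rw [PySem.Int.floordiv_eq_ediv_of_pos (by norm_num), h]
  exact Int.mul_ediv_cancel_left L (by norm_num)

-- counting 'hits' in row.take n equals the indicator sum over indices < n (needs n ≤ row.length)
lemma countP_take_eq (p : String → Bool) (row : List String) :
    ∀ n, n ≤ row.length →
      ((row.take n).countP p : Int) = pvSL (fun j => p (row.getD j "")) (List.range n) := by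
  intro n
  induction n with
  | zero => intro _; simp [pvSL]
  | succ n ih =>
    intro hn
    have hn' : n < row.length := by omega
    rw [List.take_add_one]
    have : row[n]? = some row[n] := List.getElem?_eq_getElem hn'
    rw [this]
    simp only [Option.toList_some, List.countP_append]
    have hgetD : row.getD n "" = row[n] := List.getD_eq_getElem row "" hn'
    push_cast
    rw [ih (by omega)]
    by_cases hp : p row[n] <;>
      simp [pvSL, pvX, List.range_succ, hp, this]

-- the column comprehension's count equals the indicator sum
lemma countP_map_range_eq (p : String → Bool) (f : Nat → String) (n : Nat) :
    (((List.range n).map f).countP p : Int) = pvSL (fun i => p (f i)) (List.range n) := by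
  rw [List.countP_map, pvSL_countP]
  rfl

-- normalisation of port A to a double indicator sum
lemma A_eq_sum (matrix : List (List String)) :
    demCapDongXu matrix =
      ((List.range matrix.length).map (fun i =>
        ((List.range matrix.length).map (fun j =>
          (if ((matrix.getD i []).getD j "" == "C") then
            pvSL (fun k => (matrix.getD k []).getD j "" == "C") (((List.range matrix.length)).drop (i+1))
            + pvSL (fun k => (matrix.getD i []).getD k "" == "C") (((List.range matrix.length)).drop (j+1))
          else 0))).sum)).sum := by
  unfold demCapDongXu
  set n := matrix.length with hn
  have hinner : ∀ (i : Nat) (c : Int),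
      (List.range n).foldl (fun count j =>
        if (matrix.getD i []).getD j "" == "C" then
          let count := ((List.range n).drop (i+1)).foldl
            (fun c k => if (matrix.getD k []).getD j "" == "C" then c + 1 else c) count
          ((List.range n).drop (j+1)).foldl
            (fun c k => if (matrix.getD i []).getD k "" == "C" then c + 1 else c) count
        else count) c
      = c + ((List.range n).map (fun j =>
          (if ((matrix.getD i []).getD j "" == "C") then
            pvSL (fun k => (matrix.getD k []).getD j "" == "C") ((List.range n).drop (i+1))
            + pvSL (fun k => (matrix.getD i []).getD k "" == "C") ((List.range n).drop (j+1))
          else 0))).sum := by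
    intro i c
    apply foldl_shift
    intro d j
    by_cases h : ((matrix.getD i []).getD j "" == "C")
    · simp only [h, if_true]
      rw [PySem.List.foldl_count_if, PySem.List.foldl_count_if, pvSL_countP, pvSL_countP]
      ring
    · simp only [h]
      simp
  rw [foldl_shift _ _ (fun c i => hinner i c)]
  simp

-- per-row term of B equals A's row-pairs sum (i < n, Pre_)
lemma row_term_eq (matrix : List (List String)) (hpre : Pre_demCapDongXu matrix)
    (i : Nat) (hi : i < matrix.length) :
    PySem.Int.floordiv ((((matrix.getD i []).take matrix.length).countP (· == "C") : Int) *
        ((((matrix.getD i []).take matrix.length).countP (· == "C") : Int) - 1)) 2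
      = pvT (fun j => (matrix.getD i []).getD j "" == "C") matrix.length := by
  have hmem : matrix.getD i [] ∈ matrix := by
    rw [List.getD_eq_getElem matrix [] hi]
    exact List.getElem_mem hi
  have hlen : matrix.length ≤ (matrix.getD i []).length := hpre _ hmem
  rw [countP_take_eq (· == "C") (matrix.getD i []) matrix.length hlen]
  exact fdiv_half _ _ (two_mul_pvT _ _).symm

-- per-column term of B equals A's column-pairs sum
lemma col_term_eq (matrix : List (List String)) (j : Nat) :
    PySem.Int.floordiv ((((List.range matrix.length).map (fun i => (matrix.getD i []).getD j "")).countP (· == "C") : Int) *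
        ((((List.range matrix.length).map (fun i => (matrix.getD i []).getD j "")).countP (· == "C") : Int) - 1)) 2
      = pvT (fun i => (matrix.getD i []).getD j "" == "C") matrix.length := by
  rw [countP_map_range_eq (· == "C") _ matrix.length]
  exact fdiv_half _ _ (two_mul_pvT _ _).symm

-- ===== VERDICT (by name: the statement is the Claim_ definition above) =====
theorem demCapDongXu_spec : Claim_equal_demCapDongXu := by
  intro matrix _hdom hpre
  unfold Spec_demCapDongXu
  rw [A_eq_sum]
  set n := matrix.length with hn
  -- split A's sum into the column part and the row part
  have hsplit :
      ((List.range n).map (fun i => ((List.range n).map (fun j =>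
        (if ((matrix.getD i []).getD j "" == "C") then
          pvSL (fun k => (matrix.getD k []).getD j "" == "C") ((List.range n).drop (i+1))
          + pvSL (fun k => (matrix.getD i []).getD k "" == "C") ((List.range n).drop (j+1))
        else 0))).sum)).sum
      = ((List.range n).map (fun i => ((List.range n).map (fun j =>
          (if ((matrix.getD i []).getD j "" == "C") then
            pvSL (fun k => (matrix.getD k []).getD j "" == "C") ((List.range n).drop (i+1)) else 0))).sum)).sum
        + ((List.range n).map (fun i => ((List.range n).map (fun j =>
          (if ((matrix.getD i []).getD j "" == "C") then
            pvSL (fun k => (matrix.getD i []).getD k "" == "C") ((List.range n).drop (j+1)) else 0))).sum)).sum := by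
    rw [← PySem.List.sum_map_add_int]
    apply congrArg
    apply List.map_congr_left
    intro i _
    rw [← PySem.List.sum_map_add_int]
    apply congrArg
    apply List.map_congr_left
    intro j _
    split_ifs <;> simp
  rw [hsplit]
  -- column part: swap the two sums, then each inner sum is pvT of the column predicate
  rw [sum_comm_range (fun i j =>
    (if ((matrix.getD i []).getD j "" == "C") then
      pvSL (fun k => (matrix.getD k []).getD j "" == "C") ((List.range n).drop (i+1)) else 0)) n n]
  -- B's value
  unfold demCapDongXu_alt
  rw [foldl_shift _ _ (fun t j => rfl), foldl_shift _ _ (fun t i => rfl)]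
  rw [zero_add, ← hn]
  have hrow : ((List.range n).map (fun i =>
      PySem.Int.floordiv ((((matrix.getD i []).take n).countP (· == "C") : Int) *
        ((((matrix.getD i []).take n).countP (· == "C") : Int) - 1)) 2)).sum
      = ((List.range n).map (fun i => ((List.range n).map (fun j =>
          (if ((matrix.getD i []).getD j "" == "C") then
            pvSL (fun k => (matrix.getD i []).getD k "" == "C") ((List.range n).drop (j+1)) else 0))).sum)).sum := by
    apply congrArg
    apply List.map_congr_left
    intro i hi
    rw [hn] at *
    rw [row_term_eq matrix hpre i (List.mem_range.mp hi)]
    rfl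
  have hcol : ((List.range n).map (fun j =>
      PySem.Int.floordiv ((((List.range n).map (fun i => (matrix.getD i []).getD j "")).countP (· == "C") : Int) *
        ((((List.range n).map (fun i => (matrix.getD i []).getD j "")).countP (· == "C") : Int) - 1)) 2)).sum
      = ((List.range n).map (fun j => ((List.range n).map (fun i =>
          (if ((matrix.getD i []).getD j "" == "C") then
            pvSL (fun k => (matrix.getD k []).getD j "" == "C") ((List.range n).drop (i+1)) else 0))).sum)).sum := by
    apply congrArg
    apply List.map_congr_left
    intro j _
    rw [hn] at *
    rw [col_term_eq matrix j]
    rfl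
  rw [hrow, hcol]
  ring
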